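-- pv_equiv track=rewrite | github.com/takuizm/web-security-audit-tool | src/external/security_trails_api.py | _identify_dangerous_subdomains
-- ===== SOURCE A (Python) =====
-- from typing import Dict, Any, List, Optional
--
-- def _identify_dangerous_subdomains(subdomains: List[str]) -> List[str]:
--     """
--     危険なサブドメインを特定
--
--     Args:
--         subdomains: サブドメインリスト
--
--     Returns:
--         危険なサブドメインリスト
--     """
--     dangerous_patterns = [
--         'admin', 'administrator', 'root', 'test', 'testing',
--         'dev', 'development', 'staging', 'stage', 'beta',
--         'internal', 'private', 'secure', 'vpn', 'ftp',
--         'mail', 'email', 'webmail', 'mx', 'smtp',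
--         'api', 'rest', 'service', 'micro',
--         'db', 'database', 'sql', 'mysql', 'postgres',
--         'backup', 'bak', 'old', 'temp', 'tmp'
--     ]
--
--     dangerous_subdomains = []
--
--     for subdomain in subdomains:
--         subdomain_lower = subdomain.lower()
--         for pattern in dangerous_patterns:
--             if pattern in subdomain_lower:
--                 dangerous_subdomains.append(subdomain)
--                 break
--
--     return dangerous_subdomains
-- ===== SOURCE B (Python) =====
-- from typing import List
--
-- _DANGEROUS = frozenset([
--     'admin', 'administrator', 'root', 'test', 'testing',
--     'dev', 'development', 'staging', 'stage', 'beta',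
--     'internal', 'private', 'secure', 'vpn', 'ftp',
--     'mail', 'email', 'webmail', 'mx', 'smtp',
--     'api', 'rest', 'service', 'micro',
--     'db', 'database', 'sql', 'mysql', 'postgres',
--     'backup', 'bak', 'old', 'temp', 'tmp'
-- ])
-- _LENGTHS = sorted({len(p) for p in _DANGEROUS})
--
--
-- def _is_dangerous(name: str) -> bool:
--     # Multi-pattern matching by hashing: a name is dangerous iff one of its
--     # substrings (of a length some pattern has) is itself a dangerous pattern.
--     t = name.lower()
--     return any(t[i:i + n] in _DANGEROUS
--                for i in range(len(t))
--                for n in _LENGTHS)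
--
--
-- def _identify_dangerous_subdomains(subdomains: List[str]) -> List[str]:
--     return [s for s in subdomains if _is_dangerous(s)]
-- ===== Notes on version B (the rewrite author's own statement) =====
-- stated objective: alternative
-- what changed: B does multi-pattern matching by hashing: it precomputes a frozenset of the patterns and the sorted set of their lengths, and marks a subdomain dangerous iff some substring whose length is a pattern length is in the set, replacing A's per-pattern inner substring-scan loop with set lookups whose count is independent of the number of patterns.
import Mathlib
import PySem

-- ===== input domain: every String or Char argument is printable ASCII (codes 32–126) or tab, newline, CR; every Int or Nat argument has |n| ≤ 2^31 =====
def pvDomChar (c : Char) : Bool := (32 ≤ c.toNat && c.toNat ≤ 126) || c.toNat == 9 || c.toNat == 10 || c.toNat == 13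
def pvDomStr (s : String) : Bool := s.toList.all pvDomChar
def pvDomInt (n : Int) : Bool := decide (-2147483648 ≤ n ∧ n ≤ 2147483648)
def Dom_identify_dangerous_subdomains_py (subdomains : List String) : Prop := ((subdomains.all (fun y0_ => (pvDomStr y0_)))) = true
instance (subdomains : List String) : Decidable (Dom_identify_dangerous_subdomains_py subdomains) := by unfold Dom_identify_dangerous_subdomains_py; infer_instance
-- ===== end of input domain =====

-- B matches the pattern set by hashed lookup of substrings of pattern lengths
-- instead of A's per-pattern inner substring scan; objective: alternative, same outputs.

-- ===== PORT A =====
def pvPatternsA : List String :=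
  ["admin", "administrator", "root", "test", "testing",
   "dev", "development", "staging", "stage", "beta",
   "internal", "private", "secure", "vpn", "ftp",
   "mail", "email", "webmail", "mx", "smtp",
   "api", "rest", "service", "micro",
   "db", "database", "sql", "mysql", "postgres",
   "backup", "bak", "old", "temp", "tmp"]

-- inner 'for pattern in dangerous_patterns: if pattern in subdomain_lower: append; break'
-- modelled as: does the scan reach an appending pattern?
def pvInnerA (lo : String) : List String → Bool
  | [] => false
  | p :: ps => if PySem.Str.isIn p lo then true else pvInnerA lo ps

def identify_dangerous_subdomains_py (subdomains : List String) : List String :=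
  subdomains.foldl (fun acc subdomain =>
    if pvInnerA (PySem.Str.lower subdomain) pvPatternsA then acc ++ [subdomain] else acc) []

-- ===== PORT B =====
def pvPatternListB : List String :=
  ["admin", "administrator", "root", "test", "testing",
   "dev", "development", "staging", "stage", "beta",
   "internal", "private", "secure", "vpn", "ftp",
   "mail", "email", "webmail", "mx", "smtp",
   "api", "rest", "service", "micro",
   "db", "database", "sql", "mysql", "postgres",
   "backup", "bak", "old", "temp", "tmp"]

-- _DANGEROUS (frozenset of the patterns, as lists of chars)
def pvDangerousSet : PySem.Set (List Char) :=
  PySem.Set.ofList (pvPatternListB.map String.toList)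

-- _LENGTHS = sorted({len(p) for p in _DANGEROUS})
def pvLengths : List Nat :=
  PySem.List.sorted (PySem.Set.ofList (pvPatternListB.map (fun p => p.toList.length))) (fun x => x) false

-- t[i:i+n] for 0 ≤ i < len(t), n ≥ 0 is (t.drop i).take n
def pvIsDangerous (name : String) : Bool :=
  let t := PySem.Chars.lower name.toList
  (List.range t.length).any (fun i =>
    pvLengths.any (fun n => pvDangerousSet.contains ((t.drop i).take n)))

def identify_dangerous_subdomains_py_alt (subdomains : List String) : List String :=
  subdomains.filter pvIsDangerous

-- ===== PRECONDITION & SPEC =====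
def Spec_identify_dangerous_subdomains_py (subdomains : List String) (out : List String) : Prop := out = identify_dangerous_subdomains_py_alt subdomains
instance (subdomains : List String) (out : List String) : Decidable (Spec_identify_dangerous_subdomains_py subdomains out) := by unfold Spec_identify_dangerous_subdomains_py; infer_instance

-- ===== CLAIM (what is proved, stated in full; the proofs are below) =====
def Claim_equal_identify_dangerous_subdomains_py : Prop := ∀ (subdomains : List String), Dom_identify_dangerous_subdomains_py subdomains → Spec_identify_dangerous_subdomains_py subdomains (identify_dangerous_subdomains_py subdomains)

-- ===== LEMMAS AND PROOFS =====

-- A's inner break-loop is the 'any' of its membership tests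
lemma pvInnerA_eq_any (lo : String) (ps : List String) :
    pvInnerA lo ps = ps.any (fun p => PySem.Str.isIn p lo) := by
  induction ps with
  | nil => rfl
  | cons p ps ih => by_cases h : PySem.Str.isIn p lo <;> simp [pvInnerA, ih]

-- each pattern is nonempty and its length occurs in the length table
set_option maxRecDepth 4000 in
lemma pvPat_facts : ∀ p ∈ pvPatternListB, p.toList ≠ [] ∧ p.toList.length ∈ pvLengths := by
  decide

-- membership in the pattern set is membership in the pattern list
lemma pvContains_iff (q : List Char) :
    pvDangerousSet.contains q = true ↔ ∃ p ∈ pvPatternListB, p.toList = q := by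
  simp [pvDangerousSet, PySem.Set.contains, PySem.Set.mem_ofList, eq_comm]

-- B's hashed-substring test hits exactly when some pattern is an infix
lemma pvIsDangerous_iff (s : String) :
    pvIsDangerous s = true ↔ ∃ p ∈ pvPatternListB, p.toList <:+: PySem.Chars.lower s.toList := by
  unfold pvIsDangerous
  simp only [List.any_eq_true, List.mem_range, pvContains_iff]
  constructor
  · rintro ⟨i, _, n, _, p, hp, hpt⟩
    exact ⟨p, hp, hpt ▸ ((List.take_prefix _ _).isInfix.trans ((PySem.Chars.lower s.toList).drop_suffix i).isInfix)⟩
  · rintro ⟨p, hp, hinf⟩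
    obtain ⟨hne, hlen⟩ := pvPat_facts p hp
    rcases List.infix_iff_prefix_suffix.mp hinf with ⟨u, hpre, hsuf⟩
    set t := PySem.Chars.lower s.toList with ht
    refine ⟨t.length - u.length, ?_, p.toList.length, hlen, p, hp, ?_⟩
    · have hud : u = t.drop (t.length - u.length) := List.suffix_iff_eq_drop.mp hsuf
      have : u ≠ [] := fun h => hne (List.prefix_nil.mp (h ▸ hpre))
      have hul : 0 < u.length := List.length_pos_of_ne_nil this
      have := hsuf.length_le
      omega
    · have hud : u = t.drop (t.length - u.length) := List.suffix_iff_eq_drop.mp hsuf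
      rw [← hud]
      exact List.prefix_iff_eq_take.mp hpre

-- per-subdomain agreement of the two membership tests
lemma pvHit_eq (s : String) :
    pvInnerA (PySem.Str.lower s) pvPatternsA = pvIsDangerous s := by
  rw [pvInnerA_eq_any]
  have hbridge : (PySem.Str.lower s).toList = PySem.Chars.lower s.toList := by simp
  refine Bool.coe_iff_coe.mp ?_
  rw [pvIsDangerous_iff]
  simp only [List.any_eq_true, PySem.Str.isIn_iff_infix, hbridge]
  have hsame : pvPatternsA = pvPatternListB := by decide
  rw [hsame]

-- ===== VERDICT (by name: the statement is the Claim_ definition above) =====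
theorem identify_dangerous_subdomains_py_spec : Claim_equal_identify_dangerous_subdomains_py := by
  intro subdomains _
  unfold Spec_identify_dangerous_subdomains_py identify_dangerous_subdomains_py identify_dangerous_subdomains_py_alt
  simp only [pvHit_eq]
  simpa using PySem.List.foldl_append_if pvIsDangerous id subdomains []
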